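-- pv_equiv track=rewrite | github.com/longle325/ai-engineering-from-scratch | phases/06-speech-and-audio/13-neural-audio-codecs/code/main.py | quantize_with_codebook
-- ===== SOURCE A (Python) =====
-- def quantize_with_codebook(values, codebook):
--     indices = []
--     residuals = []
--     for v in values:
--         idx = min(range(len(codebook)), key=lambda i: abs(codebook[i] - v))
--         indices.append(idx)
--         residuals.append(v - codebook[idx])
--     return indices, residuals
-- ===== SOURCE B (Python) =====
-- from bisect import bisect_left
--
-- def quantize_with_codebook(values, codebook):
--     # first occurrence index of each distinct codebook value
--     first = {}
--     for i, c in enumerate(codebook):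
--         first.setdefault(c, i)
--     vals = sorted(first)                 # distinct values, strictly increasing
--     idxs = [first[c] for c in vals]      # smallest original index per value
--     indices = []
--     residuals = []
--     for v in values:
--         pos = bisect_left(vals, v)
--         best = None
--         for p in (pos - 1, pos):
--             if 0 <= p < len(vals):
--                 cand = (abs(vals[p] - v), idxs[p])
--                 if best is None or cand < best:
--                     best = cand
--         idx = best[1]
--         indices.append(idx)
--         residuals.append(v - codebook[idx])
--     return indices, residuals
-- ===== Notes on version B (the rewrite author's own statement) =====
-- stated objective: faster
-- what changed: Instead of scanning the whole codebook for every value, B builds once a table of the distinct codebook values (each with its first original index), sorts it, and answers each value with one binary search comparing only the two neighbouring entries (ties broken by smaller distance, then smaller original index, exactly Python's min tie-breaking).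
import Mathlib
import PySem

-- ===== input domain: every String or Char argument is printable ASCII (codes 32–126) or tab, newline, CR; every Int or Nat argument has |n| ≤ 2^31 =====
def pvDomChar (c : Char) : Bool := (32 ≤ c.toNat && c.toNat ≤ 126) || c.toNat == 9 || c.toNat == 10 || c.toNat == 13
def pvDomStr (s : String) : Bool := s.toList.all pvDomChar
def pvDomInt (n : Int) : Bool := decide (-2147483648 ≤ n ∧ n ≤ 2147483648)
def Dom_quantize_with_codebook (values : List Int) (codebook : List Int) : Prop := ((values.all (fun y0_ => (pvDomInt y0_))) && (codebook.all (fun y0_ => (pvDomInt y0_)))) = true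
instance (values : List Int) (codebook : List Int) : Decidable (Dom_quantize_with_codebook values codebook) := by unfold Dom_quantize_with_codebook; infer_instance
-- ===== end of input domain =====

-- B replaces A's per-value linear scan of the codebook by a table of distinct codebook
-- values (first original index each), sorted once and queried by binary search per value.


-- ===== PORT A =====
-- min(range(len(codebook)), key=lambda i: abs(codebook[i] - v)) is PySem.List.min?;
-- it is none exactly when codebook = [] (Python raises ValueError there; excluded by Pre_),
-- so the .getD 0 below is unreachable inside Pre_.  codebook[i] has i drawn from
-- range(len(codebook)), always in range, so pyGetD with default 0 is exact.
def aPick (codebook : List Int) (v : Int) : Int :=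
  (PySem.List.min? (PySem.List.pyRange 0 (codebook.length : Int) 1)
      (fun i => |PySem.List.pyGetD codebook i 0 - v|)).getD 0

def quantize_with_codebook (values : List Int) (codebook : List Int) : List Int × List Int :=
  values.foldl
    (fun acc v =>
      let idx := aPick codebook v
      (acc.1 ++ [idx], acc.2 ++ [v - PySem.List.pyGetD codebook idx 0]))
    ([], [])

-- ===== PORT B =====
-- first = {}; for i, c in enumerate(codebook): first.setdefault(c, i)
-- vals = sorted(first); idxs = [first[c] for c in vals]
def bTable (codebook : List Int) : List Int × List Int :=
  let first := (PySem.List.enumerate codebook 0).foldl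
      (fun d ic => d.setdefault ic.2 ic.1) (PySem.Dict.empty : PySem.Dict Int Int)
  let vals := PySem.List.sorted first.keys (fun c => c) false
  (vals, vals.map (fun c => first.getD c 0))

-- the per-value loop body: pos = bisect_left(vals, v); best = the smaller of the ≤2
-- in-range candidates, Python's tuple comparison cand < best written out lexicographically.
-- best is None only when codebook = [] (Python raises TypeError there; excluded by Pre_),
-- so the .getD 0 is unreachable inside Pre_.  vals[p]/idxs[p] have 0 ≤ p < len(vals)
-- checked right before, so pyGetD with default 0 is exact.
def bPick (vals : List Int) (idxs : List Int) (v : Int) : Int :=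
  let pos : Int := (PySem.List.bisectLeft vals v : Int)
  let best := [pos - 1, pos].foldl
      (fun (best : Option (Int × Int)) p =>
        if 0 ≤ p ∧ p < (vals.length : Int) then
          let cand : Int × Int := (|PySem.List.pyGetD vals p 0 - v|, PySem.List.pyGetD idxs p 0)
          match best with
          | none => some cand
          | some b => if cand.1 < b.1 ∨ (cand.1 = b.1 ∧ cand.2 < b.2) then some cand else some b
        else best) none
  (best.map (·.2)).getD 0

def quantize_with_codebook_alt (values : List Int) (codebook : List Int) : List Int × List Int :=
  let t := bTable codebook
  values.foldl
    (fun acc v =>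
      let idx := bPick t.1 t.2 v
      (acc.1 ++ [idx], acc.2 ++ [v - PySem.List.pyGetD codebook idx 0]))
    ([], [])

-- ===== PRECONDITION & SPEC =====
-- A raises ValueError (min() of an empty sequence) as soon as it processes a value with an
-- empty codebook; Pre_ excludes exactly that: codebook = [] with at least one value.
def Pre_quantize_with_codebook (values : List Int) (codebook : List Int) : Prop :=
  values = [] ∨ codebook ≠ []
instance (values : List Int) (codebook : List Int) : Decidable (Pre_quantize_with_codebook values codebook) := by unfold Pre_quantize_with_codebook; infer_instance

def pvWitness_quantize_with_codebook : List Int × List Int := ([7, -3, 2], [0, 5, -4])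

def Spec_quantize_with_codebook (values : List Int) (codebook : List Int) (out : List Int × List Int) : Prop := out = quantize_with_codebook_alt values codebook
instance (values : List Int) (codebook : List Int) (out : List Int × List Int) : Decidable (Spec_quantize_with_codebook values codebook out) := by unfold Spec_quantize_with_codebook; infer_instance

-- ===== CLAIM (what is proved, stated in full; the proofs are below) =====
def Claim_equal_quantize_with_codebook : Prop := ∀ (values : List Int) (codebook : List Int), Dom_quantize_with_codebook values codebook → Pre_quantize_with_codebook values codebook → Spec_quantize_with_codebook values codebook (quantize_with_codebook values codebook)

-- ===== LEMMAS AND PROOFS =====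

-- lexicographic order on (distance, original index) pairs: Python's tie-breaking rule
def LexLe (a b : Int × Int) : Prop := a.1 < b.1 ∨ (a.1 = b.1 ∧ a.2 ≤ b.2)

-- i is the index Python selects: smallest distance, then smallest index
def IsLexMin (cb : List Int) (v : Int) (i : Int) : Prop :=
  ∃ p : Nat, (p : Int) = i ∧ p < cb.length ∧
    ∀ j : Nat, j < cb.length →
      LexLe (|cb.getD p 0 - v|, (p : Int)) (|cb.getD j 0 - v|, (j : Int))

theorem lexmin_unique {cb : List Int} {v i i' : Int}
    (h : IsLexMin cb v i) (h' : IsLexMin cb v i') : i = i' := by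
  obtain ⟨p, rfl, hp, hmin⟩ := h
  obtain ⟨q, rfl, hq, hmin'⟩ := h'
  have h1 := hmin q hq
  have h2 := hmin' p hp
  unfold LexLe at h1 h2
  omega

theorem min?_foldl_first {α κ : Type} [LinearOrder κ] (key : α → κ) :
    ∀ (xs : List α) (a m : α),
      xs.foldl (fun acc x => match acc with
        | none => some x
        | some m => if key x < key m then some x else some m) (some a) = some m →
      (m = a ∨ ∃ ys zs, xs = ys ++ m :: zs ∧ key m < key a ∧ (∀ y ∈ ys, key m < key y)) ∧
        (∀ y ∈ xs, key m ≤ key y) ∧ key m ≤ key a := by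
  intro xs
  induction xs with
  | nil =>
    intro a m h
    simp only [List.foldl, Option.some.injEq] at h
    subst h
    exact ⟨Or.inl rfl, by simp, le_refl _⟩
  | cons x t ih =>
    intro a m h
    simp only [List.foldl] at h
    by_cases hx : key x < key a
    · rw [if_pos hx] at h
      obtain ⟨hfirst, hall, hle⟩ := ih x m h
      refine ⟨?_, ?_, ?_⟩
      · rcases hfirst with rfl | ⟨ys, zs, rfl, hlt, hys⟩
        · exact Or.inr ⟨[], t, rfl, hx, by simp⟩
        · exact Or.inr ⟨x :: ys, zs, rfl, hlt.trans hx, by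
            intro y hy
            rcases List.mem_cons.1 hy with rfl | hy
            · exact hlt
            · exact hys y hy⟩
      · intro y hy
        rcases List.mem_cons.1 hy with rfl | hy
        · exact hle
        · exact hall y hy
      · exact hle.trans (le_of_lt hx)
    · rw [if_neg hx] at h
      rw [not_lt] at hx
      obtain ⟨hfirst, hall, hle⟩ := ih a m h
      refine ⟨?_, ?_, hle⟩
      · rcases hfirst with rfl | ⟨ys, zs, rfl, hlt, hys⟩
        · exact Or.inl rfl
        · exact Or.inr ⟨x :: ys, zs, rfl, hlt, by
            intro y hy
            rcases List.mem_cons.1 hy with rfl | hy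
            · exact lt_of_lt_of_le hlt hx
            · exact hys y hy⟩
      · intro y hy
        rcases List.mem_cons.1 hy with rfl | hy
        · exact hle.trans hx
        · exact hall y hy

theorem min?_first {α κ : Type} [LinearOrder κ] {xs : List α} {key : α → κ} {m : α}
    (h : PySem.List.min? xs key = some m) :
    ∃ ys zs, xs = ys ++ m :: zs ∧ (∀ y ∈ ys, key m < key y) ∧ ∀ y ∈ xs, key m ≤ key y := by
  cases xs with
  | nil => simp [PySem.List.min?] at h
  | cons x t =>
    have h' : t.foldl (fun acc x => match acc with
        | none => some x
        | some m => if key x < key m then some x else some m) (some x) = some m := h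
    obtain ⟨hfirst, hall, hle⟩ := min?_foldl_first key t x m h'
    rcases hfirst with rfl | ⟨ys, zs, rfl, hlt, hys⟩
    · exact ⟨[], t, rfl, by simp, by
        intro y hy
        rcases List.mem_cons.1 hy with rfl | hy
        · exact le_refl _
        · exact hall y hy⟩
    · exact ⟨x :: ys, zs, rfl, by
        intro y hy
        rcases List.mem_cons.1 hy with rfl | hy
        · exact hlt
        · exact hys y hy, by
        intro y hy
        rcases List.mem_cons.1 hy with rfl | hy
        · exact le_of_lt hlt
        · exact hall y hy⟩

theorem aPick_isLexMin (codebook : List Int) (v : Int) (h : codebook ≠ []) :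
    IsLexMin codebook v (aPick codebook v) := by
  set n := codebook.length with hn
  set key : Int → Int := fun i => |PySem.List.pyGetD codebook i 0 - v| with hkey
  have hxs : PySem.List.pyRange 0 (n : Int) 1 = (List.range n).map (fun k : Nat => (k : Int)) :=
    PySem.List.pyRange_zero_natCast n
  have hne : PySem.List.pyRange 0 (n : Int) 1 ≠ [] := by
    rw [hxs]
    simp [List.eq_nil_iff_length_eq_zero, hn, List.length_eq_zero_iff, h]
  obtain ⟨m, hm⟩ : ∃ m, PySem.List.min? (PySem.List.pyRange 0 (n : Int) 1) key = some m := by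
    cases hsm : PySem.List.min? (PySem.List.pyRange 0 (n : Int) 1) key with
    | none => exact absurd ((PySem.List.min?_eq_none_iff _ _).1 hsm) hne
    | some m => exact ⟨m, rfl⟩
  obtain ⟨ys, zs, hsplit, hys, hall⟩ := min?_first hm
  have hplen : ys.length < n := by
    have := congrArg List.length hsplit
    simp [hxs] at this
    omega
  set p := ys.length with hp
  have hmp : m = (p : Int) := by
    have h1 : (PySem.List.pyRange 0 (n : Int) 1)[p]? = some m := by
      rw [hsplit, List.getElem?_append_right (le_of_eq hp)]
      simp
    have h2 : (PySem.List.pyRange 0 (n : Int) 1)[p]? = some (p : Int) := by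
      rw [hxs]
      simp [hplen]
    rw [h1] at h2
    exact (Option.some.injEq _ _ ▸ h2)
  -- key at a natural cast index is the getD distance
  have hkeyj : ∀ j : Nat, key (j : Int) = |codebook.getD j 0 - v| := by
    intro j
    simp [hkey, PySem.List.pyGetD_natCast]
  refine ⟨p, ?_, hplen, ?_⟩
  · unfold aPick
    rw [← hn, ← hkey, hm, hmp, Option.getD_some]
  intro j hj
  have hjmem : (j : Int) ∈ PySem.List.pyRange 0 (n : Int) 1 := by
    rw [hxs]; exact List.mem_map.2 ⟨j, List.mem_range.2 hj, rfl⟩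
  have hle : key m ≤ key (j : Int) := hall _ hjmem
  rw [hmp, hkeyj, hkeyj] at hle
  by_cases hlt : |codebook.getD p 0 - v| < |codebook.getD j 0 - v|
  · exact Or.inl hlt
  · refine Or.inr ⟨le_antisymm hle (not_lt.1 hlt), ?_⟩
    -- show p ≤ j: otherwise j indexes into ys, where key is strictly larger
    by_contra hpj
    rw [not_le] at hpj
    have hjy : (j : Int) ∈ ys := by
      have h1 : (PySem.List.pyRange 0 (n : Int) 1)[j]? = some (j : Int) := by
        rw [hxs]
        simp [show j < n by omega]
      rw [hsplit, List.getElem?_append_left (by omega)] at h1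
      exact List.mem_of_getElem? h1
    have := hys _ hjy
    rw [hmp, hkeyj, hkeyj] at this
    omega

def foldFirst (cb : List Int) (s : Int) (d : PySem.Dict Int Int) : PySem.Dict Int Int :=
  (PySem.List.enumerate cb s).foldl (fun d ic => d.setdefault ic.2 ic.1) d

theorem foldFirst_cons (x : Int) (t : List Int) (s : Int) (d : PySem.Dict Int Int) :
    foldFirst (x :: t) s d = foldFirst t (s + 1) (d.setdefault x s) := by
  simp [foldFirst, PySem.List.enumerate_cons]

theorem foldFirst_contains (cb : List Int) : ∀ (s : Int) (d : PySem.Dict Int Int) (c : Int),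
    (foldFirst cb s d).contains c = true ↔ (d.contains c = true ∨ c ∈ cb) := by
  induction cb with
  | nil => intro s d c; simp [foldFirst, PySem.List.enumerate]
  | cons x t ih =>
    intro s d c
    rw [foldFirst_cons, ih]
    rw [PySem.Dict.contains_setdefault]
    simp [List.mem_cons]
    constructor
    · rintro (h | h) <;> [skip; tauto]
      rcases h with h | h
      · exact Or.inr (Or.inl (by simpa using h))
      · exact Or.inl h
    · rintro (h | h | h)
      · exact Or.inl (Or.inr h)
      · exact Or.inl (Or.inl (by simpa using h))
      · exact Or.inr h

theorem foldFirst_get?_old (cb : List Int) : ∀ (s : Int) (d : PySem.Dict Int Int) (c : Int),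
    d.contains c = true → (foldFirst cb s d).get? c = d.get? c := by
  induction cb with
  | nil => intro s d c _; simp [foldFirst, PySem.List.enumerate]
  | cons x t ih =>
    intro s d c h
    rw [foldFirst_cons]
    by_cases hx : c = x
    · subst hx
      rw [PySem.Dict.setdefault_of_contains d s h]
      exact ih _ _ _ h
    · have hc : (d.setdefault x s).contains c = true := by
        rw [PySem.Dict.contains_setdefault]
        simp [h]
      rw [ih _ _ _ hc, PySem.Dict.get?_setdefault_of_ne _ _ hx]

theorem foldFirst_get?_fresh (cb : List Int) : ∀ (s : Int) (d : PySem.Dict Int Int) (c : Int),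
    c ∈ cb → d.contains c = false →
    (foldFirst cb s d).get? c = some (s + (cb.idxOf c : Int)) := by
  induction cb with
  | nil => intro s d c hc; simp at hc
  | cons x t ih =>
    intro s d c hc h
    rw [foldFirst_cons]
    by_cases hx : c = x
    · subst hx
      rw [PySem.Dict.setdefault_of_not_contains d s h]
      have hc2 : ((d.insert c s)).contains c = true := by
        simp
      rw [foldFirst_get?_old _ _ _ _ hc2, PySem.Dict.get?_insert_self]
      simp [List.idxOf_cons_self]
    · have hct : c ∈ t := by
        rcases List.mem_cons.1 hc with h' | h'
        · exact absurd h' hx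
        · exact h'
      have hc2 : (d.setdefault x s).contains c = false := by
        rw [PySem.Dict.contains_setdefault]
        simp [h, hx]
      rw [ih _ _ _ hct hc2]
      congr 1
      rw [List.idxOf_cons_ne _ (by simpa using (Ne.symm hx))]
      push_cast
      ring

theorem foldFirst_nodup (cb : List Int) : ∀ (s : Int) (d : PySem.Dict Int Int),
    d.keys.Nodup → (foldFirst cb s d).keys.Nodup := by
  induction cb with
  | nil => intro s d h; simpa [foldFirst, PySem.List.enumerate] using h
  | cons x t ih =>
    intro s d h
    rw [foldFirst_cons]
    apply ih
    rw [PySem.Dict.keys_setdefault]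
    split_ifs with hc
    · exact h
    · have : x ∉ d.keys := fun hm =>
        (by simpa [hc] using (PySem.Dict.contains_iff_mem_keys d x).2 hm)
      simp only [List.nodup_append, List.nodup_cons, List.nodup_nil, and_true]
      exact ⟨h, by simp, fun a ha b hb hab => this ((show a = x by simp at hb; rw [← hb]; exact hab) ▸ ha)⟩

theorem bTable_fst (cb : List Int) :
    (bTable cb).1 = PySem.List.sorted (foldFirst cb 0 PySem.Dict.empty).keys (fun c => c) false := rfl

theorem bTable_snd (cb : List Int) :
    (bTable cb).2 = (bTable cb).1.map (fun c => (foldFirst cb 0 PySem.Dict.empty).getD c 0) := rfl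

theorem bTable_mem (cb : List Int) (c : Int) : c ∈ (bTable cb).1 ↔ c ∈ cb := by
  rw [bTable_fst, PySem.List.mem_sorted, ← PySem.Dict.contains_iff_mem_keys,
    foldFirst_contains]
  simp [PySem.Dict.contains_empty]

theorem bTable_pairwise (cb : List Int) : (bTable cb).1.Pairwise (· < ·) := by
  have hnd : (bTable cb).1.Nodup := by
    rw [bTable_fst]
    exact (PySem.List.sorted_perm _ _ _).nodup_iff.2
      (foldFirst_nodup cb 0 _ (by simp [PySem.Dict.keys_empty]))
  have hle : (bTable cb).1.Pairwise (fun a b => a ≤ b) := by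
    rw [bTable_fst]
    exact PySem.List.sorted_pairwise _ _
  exact (hle.and hnd).imp (fun h => lt_of_le_of_ne h.1 h.2)


theorem bTable_getD (cb : List Int) (c : Int) (hc : c ∈ cb) :
    (foldFirst cb 0 PySem.Dict.empty).getD c 0 = (cb.idxOf c : Int) := by
  unfold PySem.Dict.getD
  rw [foldFirst_get?_fresh cb 0 _ c hc (PySem.Dict.contains_empty c)]
  simp

theorem bTable_idx (cb : List Int) (p : Nat) (hp : p < (bTable cb).1.length) :
    (bTable cb).2.getD p 0 = (cb.idxOf ((bTable cb).1.getD p 0) : Int) := by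
  have hmem : (bTable cb).1.getD p 0 ∈ cb := by
    rw [← bTable_mem]
    rw [List.getD_eq_getElem _ _ hp]
    exact List.getElem_mem _
  rw [bTable_snd, List.getD_eq_getElem _ _ (by simpa using hp), List.getElem_map,
    List.getD_eq_getElem _ _ hp] at *
  exact bTable_getD cb _ hmem

theorem idxOf_le_of_getElem (l : List Int) (j : Nat) (hj : j < l.length) :
    l.idxOf l[j] ≤ j := by
  have hmem : l[j] ∈ l.take (j + 1) := by
    have hlen : j < (l.take (j + 1)).length := by simp; omega
    have : (l.take (j + 1))[j]'hlen = l[j] := List.getElem_take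
    rw [← this]
    exact List.getElem_mem _
  have := (List.mem_take_iff_idxOf_lt (List.getElem_mem hj)).1 hmem
  omega

def bStepf (vals idxs : List Int) (v : Int) (best : Option (Int × Int)) (p : Int) :
    Option (Int × Int) :=
  if 0 ≤ p ∧ p < (vals.length : Int) then
    let cand : Int × Int := (|PySem.List.pyGetD vals p 0 - v|, PySem.List.pyGetD idxs p 0)
    match best with
    | none => some cand
    | some b => if cand.1 < b.1 ∨ (cand.1 = b.1 ∧ cand.2 < b.2) then some cand else some b
  else best

def bCand (vals idxs : List Int) (v : Int) (q : Nat) : Int × Int :=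
  (|vals.getD q 0 - v|, idxs.getD q 0)

theorem bPick_eq (vals idxs : List Int) (v : Int) :
    bPick vals idxs v =
      ((bStepf vals idxs v
          (bStepf vals idxs v none ((PySem.List.bisectLeft vals v : Int) - 1))
          (PySem.List.bisectLeft vals v : Int)).map (·.2)).getD 0 := rfl

theorem bStepf_out (vals idxs : List Int) (v : Int) (best : Option (Int × Int)) (p : Int)
    (h : ¬(0 ≤ p ∧ p < (vals.length : Int))) : bStepf vals idxs v best p = best := if_neg h

theorem bStepf_none (vals idxs : List Int) (v : Int) (q : Nat)
    (h : q < vals.length) :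
    bStepf vals idxs v none (q : Int) = some (bCand vals idxs v q) := by
  unfold bStepf bCand
  rw [if_pos (by constructor <;> [positivity; exact_mod_cast h])]
  simp [PySem.List.pyGetD_natCast]

theorem bStepf_some (vals idxs : List Int) (v : Int) (b : Int × Int) (q : Nat)
    (h : q < vals.length) :
    bStepf vals idxs v (some b) (q : Int) =
      if (bCand vals idxs v q).1 < b.1 ∨
          ((bCand vals idxs v q).1 = b.1 ∧ (bCand vals idxs v q).2 < b.2)
        then some (bCand vals idxs v q) else some b := by
  unfold bStepf bCand
  rw [if_pos (by constructor <;> [positivity; exact_mod_cast h])]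
  simp [PySem.List.pyGetD_natCast]

theorem bPick_eval (vals idxs : List Int) (v : Int) (hne : vals ≠ [])
    (hposle : PySem.List.bisectLeft vals v ≤ vals.length) :
    ∃ q : Nat, q < vals.length ∧
      (q = PySem.List.bisectLeft vals v - 1 ∨ q = PySem.List.bisectLeft vals v) ∧
      bPick vals idxs v = (bCand vals idxs v q).2 ∧
      (∀ r : Nat, r < vals.length →
        (r = PySem.List.bisectLeft vals v - 1 ∨ r = PySem.List.bisectLeft vals v) →
        LexLe (bCand vals idxs v q) (bCand vals idxs v r)) := by
  have hm1 : 1 ≤ vals.length := List.length_pos_of_ne_nil hne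
  set m := vals.length with hm
  set p := PySem.List.bisectLeft vals v with hp
  rw [bPick_eq, ← hp]
  by_cases hp0 : p = 0
  · -- left candidate out of range, right candidate at position 0
    rw [hp0]
    rw [show ((0 : Nat) : Int) - 1 = (-1 : Int) from by norm_num]
    rw [bStepf_out vals idxs v none (-1) (by intro hc; exact absurd hc.1 (by norm_num))]
    rw [bStepf_none vals idxs v 0 (by omega)]
    exact ⟨0, by omega, by omega, rfl, by
      intro r hr hror
      have : r = 0 := by omega
      subst this
      exact Or.inr ⟨rfl, le_refl _⟩⟩
  · by_cases hpm : p = m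
    · -- right candidate out of range, left candidate at position p - 1
      have h1 : ((p : Int) - 1) = ((p - 1 : Nat) : Int) := by omega
      rw [h1, bStepf_none _ _ _ (p - 1) (by omega),
        bStepf_out _ _ _ _ _ (by omega)]
      exact ⟨p - 1, by omega, by omega, rfl, by
        intro r hr hror
        have : r = p - 1 := by omega
        subst this
        exact Or.inr ⟨rfl, le_refl _⟩⟩
    · -- both candidates in range
      have h1 : ((p : Int) - 1) = ((p - 1 : Nat) : Int) := by omega
      rw [h1, bStepf_none _ _ _ (p - 1) (by omega),
        bStepf_some _ _ _ _ p (by omega)]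
      by_cases hcmp : (bCand vals idxs v p).1 < (bCand vals idxs v (p - 1)).1 ∨
          ((bCand vals idxs v p).1 = (bCand vals idxs v (p - 1)).1 ∧
            (bCand vals idxs v p).2 < (bCand vals idxs v (p - 1)).2)
      · rw [if_pos hcmp]
        refine ⟨p, by omega, by omega, rfl, ?_⟩
        intro r hr hror
        rcases hror with rfl | rfl
        · unfold LexLe; omega
        · exact Or.inr ⟨rfl, le_refl _⟩
      · rw [if_neg hcmp]
        refine ⟨p - 1, by omega, by omega, rfl, ?_⟩
        intro r hr hror
        rcases hror with rfl | rfl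
        · exact Or.inr ⟨rfl, le_refl _⟩
        · unfold LexLe; omega

theorem bPick_isLexMin (cb : List Int) (v : Int) (h : cb ≠ []) :
    IsLexMin cb v (bPick (bTable cb).1 (bTable cb).2 v) := by
  obtain ⟨c0, hc0⟩ := List.exists_mem_of_ne_nil cb h
  have hvne : (bTable cb).1 ≠ [] := by
    intro he
    have := (bTable_mem cb c0).2 hc0
    rw [he] at this
    simp at this
  set vals := (bTable cb).1 with hvals
  set idxs := (bTable cb).2 with hidxs
  have hpw : vals.Pairwise (· < ·) := bTable_pairwise cb
  obtain ⟨hposle, hblt, hbge⟩ := PySem.List.bisectLeft_spec vals v (hpw.imp le_of_lt)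
  set pos := PySem.List.bisectLeft vals v with hpos
  obtain ⟨q, hq, hqor, heval, hmin2⟩ := bPick_eval vals idxs v hvne hposle
  -- values at table positions, and monotonicity
  have hmono : ∀ a b : Nat, a < b → (hb : b < vals.length) → vals.getD a 0 < vals.getD b 0 := by
    intro a b hab hb
    rw [List.getD_eq_getElem _ _ (by omega), List.getD_eq_getElem _ _ hb]
    exact List.pairwise_iff_getElem.1 hpw a b (by omega) hb hab
  -- distances at positions left of pos / at or right of pos
  have hleftv : ∀ a : Nat, a < pos → a < vals.length → vals.getD a 0 < v := by
    intro a ha hav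
    rw [List.getD_eq_getElem _ _ hav]
    exact hblt a hav ha
  have hrightv : ∀ a : Nat, pos ≤ a → (ha : a < vals.length) → v ≤ vals.getD a 0 := by
    intro a ha hav
    rw [List.getD_eq_getElem _ _ hav]
    exact hbge a hav ha
  -- dominance: the chosen candidate is lex-minimal over ALL table positions
  have hdom : ∀ r : Nat, r < vals.length → LexLe (bCand vals idxs v q) (bCand vals idxs v r) := by
    intro r hr
    by_cases hrp : r < pos
    · -- left side: position pos - 1 dominates
      have hpos1 : pos - 1 < vals.length := by omega
      have hcand := hmin2 (pos - 1) hpos1 (Or.inl rfl)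
      by_cases hre : r = pos - 1
      · rw [hre]; exact hcand
      · -- r < pos - 1 : strictly farther from v
        have h1 : vals.getD r 0 < vals.getD (pos - 1) 0 := hmono r (pos - 1) (by omega) hpos1
        have h2 : vals.getD (pos - 1) 0 < v := hleftv (pos - 1) (by omega) hpos1
        have h3 : (bCand vals idxs v (pos - 1)).1 < (bCand vals idxs v r).1 := by
          unfold bCand
          rw [abs_of_neg (by omega : vals.getD (pos - 1) 0 - v < 0),
            abs_of_neg (by omega : vals.getD r 0 - v < 0)]
          omega
        rcases hcand with h4 | h4
        · exact Or.inl (h4.trans h3)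
        · exact Or.inl (h4.1 ▸ h3)
    · -- right side: position pos dominates
      have hposr : pos < vals.length := by omega
      have hcand := hmin2 pos hposr (Or.inr rfl)
      by_cases hre : r = pos
      · rw [hre]; exact hcand
      · have h1 : vals.getD pos 0 < vals.getD r 0 := hmono pos r (by omega) hr
        have h2 : v ≤ vals.getD pos 0 := hrightv pos (le_refl _) hposr
        have h3 : (bCand vals idxs v pos).1 < (bCand vals idxs v r).1 := by
          unfold bCand
          rw [abs_of_nonneg (by omega : 0 ≤ vals.getD pos 0 - v),
            abs_of_nonneg (by omega : 0 ≤ vals.getD r 0 - v)]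
          omega
        rcases hcand with h4 | h4
        · exact Or.inl (h4.trans h3)
        · exact Or.inl (h4.1 ▸ h3)
  -- identify the chosen candidate with an original-codebook index
  have hqmem : vals.getD q 0 ∈ cb := by
    rw [← bTable_mem cb, ← hvals, List.getD_eq_getElem _ _ hq]
    exact List.getElem_mem _
  set cstar := vals.getD q 0 with hcstar
  set pstar := cb.idxOf cstar with hpstar
  have hpstarlt : pstar < cb.length := List.idxOf_lt_length_of_mem hqmem
  have hcbp : cb.getD pstar 0 = cstar := by
    rw [List.getD_eq_getElem _ _ hpstarlt]
    exact List.getElem_idxOf _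
  have hidxq : idxs.getD q 0 = (pstar : Int) := by
    rw [hidxs, bTable_idx cb q (by rw [← hvals]; exact hq), ← hvals, ← hcstar, ← hpstar]
  refine ⟨pstar, ?_, hpstarlt, ?_⟩
  · rw [heval]
    unfold bCand
    rw [hidxq]
  · intro j hj
    -- the codebook entry at j appears in the table at some position r
    have hjmem : cb.getD j 0 ∈ vals := by
      rw [hvals, bTable_mem cb, List.getD_eq_getElem _ _ hj]
      exact List.getElem_mem _
    obtain ⟨r, hr, hrv⟩ := List.mem_iff_getElem.1 hjmem
    have hrv' : vals.getD r 0 = cb.getD j 0 := by rw [List.getD_eq_getElem _ _ hr, hrv]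
    -- the table stores the first original index of that value
    have hidxr : idxs.getD r 0 = (cb.idxOf (cb.getD j 0) : Int) := by
      rw [hidxs, bTable_idx cb r (by rw [← hvals]; exact hr), ← hvals, hrv']
    have hile : cb.idxOf (cb.getD j 0) ≤ j := by
      have := idxOf_le_of_getElem cb j hj
      rw [← List.getD_eq_getElem _ _ hj] at this
      exact this
    have hstep := hdom r hr
    unfold bCand at hstep
    rw [hidxq, hidxr, hrv'] at hstep
    rw [hcbp, hcstar]
    rcases hstep with h4 | h4
    · exact Or.inl h4
    · exact Or.inr ⟨h4.1, by
        have := h4.2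
        have : (cb.idxOf (cb.getD j 0) : Int) ≤ (j : Int) := by exact_mod_cast hile
        omega⟩

theorem pick_eq (codebook : List Int) (v : Int) (h : codebook ≠ []) :
    aPick codebook v = bPick (bTable codebook).1 (bTable codebook).2 v :=
  lexmin_unique (aPick_isLexMin codebook v h) (bPick_isLexMin codebook v h)

-- ===== VERDICT (by name: the statement is the Claim_ definition above) =====
theorem quantize_with_codebook_spec : Claim_equal_quantize_with_codebook := by
  intro values codebook _ hpre
  unfold Spec_quantize_with_codebook quantize_with_codebook quantize_with_codebook_alt
  rcases hpre with rfl | hne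
  · rfl
  · have : ∀ v, aPick codebook v = bPick (bTable codebook).1 (bTable codebook).2 v :=
      fun v => pick_eq codebook v hne
    simp only [this]
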